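-- pv_equiv track=rewrite | github.com/MrBrantCode/unitest_baseline | mut_generate/mist_train_taco/taco_12538/solution.py | generate_forest_plan
-- ===== SOURCE A (Python) =====
-- def generate_forest_plan(n, m):
--     arr = [[0] * m for _ in range(n)]
--
--     if m >= 4:
--         arr[0] = list(range(m - 1, 0, -2)) + list(range(m, 0, -2))
--         for i in range(1, n):
--             for j in range(m):
--                 arr[i][j] = arr[i - 1][j] + m
--     elif n >= 4:
--         for (ind, i) in enumerate(list(range(n - 1, 0, -2)) + list(range(n, 0, -2))):
--             arr[ind][0] = i
--         for j in range(1, m):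
--             for i in range(n):
--                 arr[i][j] = arr[i][j - 1] + n
--     elif n == 2 and m == 3:
--         arr = [[3, 6, 2], [5, 1, 4]]
--     elif n == 3 and m == 2:
--         arr = [[3, 5], [6, 1], [2, 4]]
--     elif n == 3 and m == 3:
--         arr = [[1, 7, 4], [3, 9, 6], [5, 2, 8]]
--     elif n == 1 and m == 1:
--         arr = [[1]]
--     else:
--         return -1
--
--     return arr
-- ===== SOURCE B (Python) =====
-- def _slot(k, r):
--     # index at which value r (1 <= r <= k) of a size-k block lands:
--     # values with k-r odd occupy the front half, values with k-r even the back half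
--     if (k - r) % 2 == 0:
--         return k // 2 + (k - r) // 2
--     return (k - 1 - r) // 2
--
--
-- def generate_forest_plan(n, m):
--     if m >= 4:
--         out = []
--         for i in range(n):
--             row = [0] * m
--             for r in range(1, m + 1):
--                 row[_slot(m, r)] = i * m + r
--             out.append(row)
--         return out
--     if n >= 4:
--         rows = [None] * n
--         for r in range(1, n + 1):
--             rows[_slot(n, r)] = [r + j * n for j in range(m)]
--         return rows
--     if n == 2 and m == 3:
--         return [[3, 6, 2], [5, 1, 4]]
--     if n == 3 and m == 2:
--         return [[3, 5], [6, 1], [2, 4]]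
--     if n == 3 and m == 3:
--         return [[1, 7, 4], [3, 9, 6], [5, 2, 8]]
--     if n == 1 and m == 1:
--         return [[1]]
--     return -1
-- ===== Notes on version B (the rewrite author's own statement) =====
-- stated objective: alternative
-- what changed: B inverts the mapping: instead of building the seed row/column from descending ranges and propagating it with a carried +m/+n recurrence, it iterates over the VALUES 1..k and scatters each value into the index computed by a closed-form slot function (parity of k-r decides front/back half), placing whole rows at once in the n>=4 branch.
-- outside the precondition, e.g. on generate_forest_plan(2, 2): A returns -1, B returns -1; on generate_forest_plan(0, 5): A raises IndexError, B returns []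
import Mathlib
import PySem

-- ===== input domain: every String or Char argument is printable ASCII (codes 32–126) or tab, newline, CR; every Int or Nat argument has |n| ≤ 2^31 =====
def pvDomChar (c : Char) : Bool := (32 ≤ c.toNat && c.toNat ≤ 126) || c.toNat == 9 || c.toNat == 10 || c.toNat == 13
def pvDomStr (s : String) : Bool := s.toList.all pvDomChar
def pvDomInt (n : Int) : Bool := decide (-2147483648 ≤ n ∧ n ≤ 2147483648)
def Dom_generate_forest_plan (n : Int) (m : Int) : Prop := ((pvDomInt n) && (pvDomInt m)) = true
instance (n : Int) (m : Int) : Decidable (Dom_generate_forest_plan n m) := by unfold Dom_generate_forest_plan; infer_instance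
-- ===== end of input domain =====

-- B inverts the construction: instead of building a seed row/column from descending
-- ranges and carrying it across the grid with +m/+n, it iterates over the values and
-- scatters each one into the index given by a closed-form slot function (objective: alternative).
-- In A's `else` branch Python returns -1 (an int, not a grid): outside Pre_, the port returns [].

-- ===== PORT A =====
-- literal transliteration of A; list mutation arr[i][j] = v becomes List.set at
-- nonnegative indices (all indices come from range/enumerate, hence ≥ 0, so .toNat is exact)
def generate_forest_plan (n : Int) (m : Int) : List (List Int) :=
  let arr : List (List Int) := (PySem.List.pyRange 0 n 1).map (fun _ => PySem.List.pyRepeat [(0 : Int)] m)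
  if 4 ≤ m then
    let arr := arr.set 0 (PySem.List.pyRange (m - 1) 0 (-2) ++ PySem.List.pyRange m 0 (-2))
    (PySem.List.pyRange 1 n 1).foldl (fun arr i =>
      (PySem.List.pyRange 0 m 1).foldl (fun arr j =>
        arr.set i.toNat ((arr.getD i.toNat []).set j.toNat
          (PySem.List.pyGetD (PySem.List.pyGetD arr (i - 1) []) j 0 + m))) arr) arr
  else if 4 ≤ n then
    let arr := (PySem.List.enumerate (PySem.List.pyRange (n - 1) 0 (-2) ++ PySem.List.pyRange n 0 (-2))).foldl
      (fun arr p => arr.set p.1.toNat ((arr.getD p.1.toNat []).set 0 p.2)) arr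
    (PySem.List.pyRange 1 m 1).foldl (fun arr j =>
      (PySem.List.pyRange 0 n 1).foldl (fun arr i =>
        arr.set i.toNat ((arr.getD i.toNat []).set j.toNat
          (PySem.List.pyGetD (PySem.List.pyGetD arr i []) (j - 1) 0 + n))) arr) arr
  else if n = 2 ∧ m = 3 then [[3, 6, 2], [5, 1, 4]]
  else if n = 3 ∧ m = 2 then [[3, 5], [6, 1], [2, 4]]
  else if n = 3 ∧ m = 3 then [[1, 7, 4], [3, 9, 6], [5, 2, 8]]
  else if n = 1 ∧ m = 1 then [[1]]
  else []  -- Python: `return -1` (not a list); these inputs are outside Pre_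

-- ===== PORT B =====
-- Source B's helper _slot(k, r): index where value r of a size-k block lands
def pvSlot (k : Int) (r : Int) : Int :=
  if PySem.Int.mod (k - r) 2 = 0 then
    PySem.Int.floordiv k 2 + PySem.Int.floordiv (k - r) 2
  else PySem.Int.floordiv (k - 1 - r) 2

def generate_forest_plan_alt (n : Int) (m : Int) : List (List Int) :=
  if 4 ≤ m then
    (PySem.List.pyRange 0 n 1).foldl (fun out i =>
      out ++ [(PySem.List.pyRange 1 (m + 1) 1).foldl
        (fun row r => row.set (pvSlot m r).toNat (i * m + r))
        (PySem.List.pyRepeat [(0 : Int)] m)]) []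
  else if 4 ≤ n then
    (PySem.List.pyRange 1 (n + 1) 1).foldl
      (fun rows r => rows.set (pvSlot n r).toNat ((PySem.List.pyRange 0 m 1).map (fun j => r + j * n)))
      (List.replicate n.toNat ([] : List Int))  -- Python [None]*n: placeholders, each overwritten
  else if n = 2 ∧ m = 3 then [[3, 6, 2], [5, 1, 4]]
  else if n = 3 ∧ m = 2 then [[3, 5], [6, 1], [2, 4]]
  else if n = 3 ∧ m = 3 then [[1, 7, 4], [3, 9, 6], [5, 2, 8]]
  else if n = 1 ∧ m = 1 then [[1]]
  else []  -- Python: `return -1` (not a list); outside Pre_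

-- ===== PRECONDITION & SPEC =====
-- Pre_ excludes (a) n ≤ 0 with m ≥ 4 and m ≤ 0 with n ≥ 4, where A raises IndexError, and
-- (b) the fall-through cases where A returns -1, an int and not a value of type list[list[int]].
def Pre_generate_forest_plan (n : Int) (m : Int) : Prop :=
  (4 ≤ m ∧ 1 ≤ n) ∨ (m ≤ 3 ∧ 1 ≤ m ∧ 4 ≤ n) ∨ (n = 2 ∧ m = 3) ∨ (n = 3 ∧ m = 2) ∨
  (n = 3 ∧ m = 3) ∨ (n = 1 ∧ m = 1)
instance (n : Int) (m : Int) : Decidable (Pre_generate_forest_plan n m) := by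
  unfold Pre_generate_forest_plan; infer_instance

def pvWitness_generate_forest_plan : Int × Int := (5, 4)

def Spec_generate_forest_plan (n : Int) (m : Int) (out : List (List Int)) : Prop :=
  out = generate_forest_plan_alt n m
instance (n : Int) (m : Int) (out : List (List Int)) : Decidable (Spec_generate_forest_plan n m out) := by
  unfold Spec_generate_forest_plan; infer_instance

-- ===== CLAIM (what is proved, stated in full; the proofs are below) =====
def Claim_equal_generate_forest_plan : Prop :=
  ∀ (n : Int) (m : Int), Dom_generate_forest_plan n m → Pre_generate_forest_plan n m →
    Spec_generate_forest_plan n m (generate_forest_plan n m)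

-- ===== LEMMAS AND PROOFS =====

-- the common closed forms both ports are reduced to
def pvSeed (k : Int) : List Int :=
  PySem.List.pyRange (k - 1) 0 (-2) ++ PySem.List.pyRange k 0 (-2)

def pvClosed1 (n m : Int) : List (List Int) :=
  (PySem.List.pyRange 0 n 1).map (fun i => (pvSeed m).map (fun v => v + i * m))

def pvClosed2 (n m : Int) : List (List Int) :=
  (pvSeed n).map (fun c => (PySem.List.pyRange 0 m 1).map (fun j => c + j * n))

-- the value that lands at index j of a size-k block (inverse of pvSlot)
def pvVal (k : Int) (j : Nat) : Int :=
  if (j : Int) < k / 2 then k - 1 - 2 * (j : Int) else k - 2 * ((j : Int) - k / 2)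

-- list-surgery helpers: reading/writing the row just after a prefix
theorem pv_getD_append_cons {α : Type} (Q : List α) (X : α) (r : List α) (d : α) :
    (Q ++ X :: r).getD Q.length d = X := by
  rw [List.getD_append_right Q _ d Q.length le_rfl]
  simp

theorem pv_set_append_cons {α : Type} (Q : List α) (X Y : α) (r : List α) :
    (Q ++ X :: r).set Q.length Y = Q ++ Y :: r := by
  rw [List.set_append]
  simp

theorem pv_getD_append_cons2 {α : Type} (Q : List α) (P X : α) (r : List α) (d : α) :
    (Q ++ P :: X :: r).getD (Q.length + 1) d = X := by
  have h := pv_getD_append_cons (Q ++ [P]) X r d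
  simp only [List.length_append, List.length_singleton, List.append_assoc,
    List.singleton_append] at h
  exact h

theorem pv_set_append_cons2 {α : Type} (Q : List α) (P X Y : α) (r : List α) :
    (Q ++ P :: X :: r).set (Q.length + 1) Y = Q ++ P :: Y :: r := by
  have h := pv_set_append_cons (Q ++ [P]) X Y r
  simp only [List.length_append, List.length_singleton, List.append_assoc,
    List.singleton_append] at h
  exact h

-- length of the seed pattern range(k-1,0,-2)+range(k,0,-2): exactly k entries (k ≥ 0)
theorem pv_seed_length (m : Int) (hm : 0 ≤ m) :
    (PySem.List.pyRange (m - 1) 0 (-2) ++ PySem.List.pyRange m 0 (-2)).length = m.toNat := by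
  simp only [PySem.List.pyRange, List.length_append]
  norm_num
  split_ifs <;> omega

-- 1D row fill: setting positions 0..t-1 of cur to f(prev[j]) (prefix of the mapped row)
theorem pv_fill_row (f : Int → Int) (prev : List Int) :
    ∀ (t : Nat) (cur : List Int), cur.length = prev.length → t ≤ prev.length →
    (List.range t).foldl (fun c j => c.set j (f (prev.getD j 0))) cur
      = (prev.map f).take t ++ cur.drop t := by
  intro t
  induction t with
  | zero => intro cur hc ht; simp
  | succ t ih =>
    intro cur hc ht
    have ht' : t ≤ prev.length := by omega
    have htl : t < prev.length := by omega
    have htc : t < cur.length := by omega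
    rw [List.range_succ, List.foldl_append, ih cur hc ht']
    simp only [List.foldl_cons, List.foldl_nil]
    have hlen : ((prev.map f).take t).length = t := by
      simp [List.length_take]; omega
    rw [List.set_append]
    rw [if_neg (by omega)]
    rw [hlen]
    rw [Nat.sub_self]
    rw [List.drop_eq_getElem_cons htc]
    rw [List.set_cons_zero]
    have hgd : prev.getD t 0 = prev[t] := List.getD_eq_getElem prev 0 htl
    rw [hgd]
    have htake : (prev.map f).take (t + 1) = (prev.map f).take t ++ [f prev[t]] := by
      rw [List.take_add_one]
      have : (prev.map f)[t]? = some (f prev[t]) := by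
        rw [List.getElem?_eq_getElem (by simpa using htl)]
        simp
      rw [this]
      rfl
    rw [htake]
    simp

-- the whole inner row loop of A's m ≥ 4 branch, as a map over the previous row
theorem pv_fill_full (f : Int → Int) (prev cur : List Int) (mm : Nat)
    (hp : prev.length = mm) (hc : cur.length = mm) :
    (PySem.List.pyRange 0 (mm : Int) 1).foldl
        (fun c j => c.set j.toNat (f (PySem.List.pyGetD prev j 0))) cur
      = prev.map f := by
  rw [PySem.List.pyRange_zero_natCast, List.foldl_map]
  simp only [Int.toNat_natCast, PySem.List.pyGetD_natCast]
  rw [pv_fill_row f prev mm cur (by omega) (by omega)]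
  rw [← hp]
  simp [hp, ← hc]

-- A's inner loop touches only row i, reading row i-1: factor it out of the grid
theorem pv_inner_factor (m : Int) (js : List Int) (i : Int) (hi : 1 ≤ i)
    (Q : List (List Int)) (prev : List Int) (rest : List (List Int))
    (hQ : Q.length + 1 = i.toNat) :
    ∀ (cur : List Int),
    js.foldl (fun arr j => arr.set i.toNat ((arr.getD i.toNat []).set j.toNat
        (PySem.List.pyGetD (PySem.List.pyGetD arr (i - 1) []) j 0 + m))) (Q ++ prev :: cur :: rest)
      = Q ++ prev :: (js.foldl (fun c j => c.set j.toNat (PySem.List.pyGetD prev j 0 + m)) cur) :: rest := by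
  induction js with
  | nil => intro cur; rfl
  | cons j js ih =>
    intro cur
    simp only [List.foldl_cons]
    have hi1 : i - 1 = (Q.length : Int) := by omega
    have hit : i.toNat = Q.length + 1 := hQ.symm
    have hgp : PySem.List.pyGetD (Q ++ prev :: cur :: rest) (i - 1) [] = prev := by
      rw [hi1, PySem.List.pyGetD_natCast]
      exact pv_getD_append_cons Q prev (cur :: rest) []
    have hgc : (Q ++ prev :: cur :: rest).getD i.toNat [] = cur := by
      rw [hit]; exact pv_getD_append_cons2 Q prev cur rest []
    have hset : ∀ X : List Int, (Q ++ prev :: cur :: rest).set i.toNat X = Q ++ prev :: X :: rest := by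
      intro X; rw [hit]; exact pv_set_append_cons2 Q prev cur X rest
    rw [hgp, hgc, hset]
    exact ih _

-- A's outer loop in the m ≥ 4 branch: rows filled so far are the closed form row0 + i*m
theorem pv_outerA (n m : Int) (hm : 4 ≤ m) (R0 : List Int) (hR : R0.length = m.toNat) :
    ∀ (k : Int), 1 ≤ k → k ≤ n →
    (PySem.List.pyRange 1 k 1).foldl (fun arr i =>
        (PySem.List.pyRange 0 m 1).foldl (fun arr j =>
          arr.set i.toNat ((arr.getD i.toNat []).set j.toNat
            (PySem.List.pyGetD (PySem.List.pyGetD arr (i - 1) []) j 0 + m))) arr)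
      (R0 :: (PySem.List.pyRange 1 n 1).map (fun _ => List.replicate m.toNat 0))
    = (PySem.List.pyRange 0 k 1).map (fun i => R0.map (fun v => v + i * m))
      ++ (PySem.List.pyRange k n 1).map (fun _ => List.replicate m.toNat 0) := by
  intro k hk
  induction k, hk using Int.le_induction with
  | base =>
    intro _
    rw [PySem.List.pyRange_one_eq_nil le_rfl, List.foldl_nil]
    have h01 : PySem.List.pyRange 0 1 1 = [0] := by decide
    rw [h01]
    simp
  | succ k hk1 ih =>
    intro hkn1
    have hkn : k ≤ n := by omega
    have hklt : k < n := by omega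
    rw [PySem.List.pyRange_one_succ_right (by omega : (1:Int) ≤ k), List.foldl_append, ih hkn]
    simp only [List.foldl_cons, List.foldl_nil]
    have e1 : PySem.List.pyRange 0 k 1 = PySem.List.pyRange 0 (k - 1) 1 ++ [k - 1] := by
      have h := PySem.List.pyRange_one_succ_right (by omega : (0:Int) ≤ k - 1)
      have : k - 1 + 1 = k := by omega
      rw [this] at h
      exact h
    have e2 : PySem.List.pyRange k n 1 = k :: PySem.List.pyRange (k + 1) n 1 :=
      PySem.List.pyRange_one_cons hklt
    rw [e1, e2]
    simp only [List.map_append, List.map_cons, List.map_nil, List.append_assoc,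
      List.cons_append, List.nil_append]
    set Q := (PySem.List.pyRange 0 (k - 1) 1).map (fun i => R0.map (fun v => v + i * m)) with hQdef
    have hQl : Q.length + 1 = k.toNat := by
      rw [hQdef]
      simp only [List.length_map, PySem.List.length_pyRange_one]
      omega
    rw [pv_inner_factor m _ k (by omega) Q _ _ hQl]
    have hmnat : ((m.toNat : Nat) : Int) = m := Int.toNat_of_nonneg (by omega)
    have hfull := pv_fill_full (fun v => v + m) (R0.map (fun v => v + (k - 1) * m))
      (List.replicate m.toNat 0) m.toNat (by simp [hR]) (by simp)
    rw [hmnat] at hfull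
    rw [hfull]
    have hrow : (R0.map (fun v => v + (k - 1) * m)).map (fun v => v + m)
        = R0.map (fun v => v + k * m) := by
      rw [List.map_map]
      apply List.map_congr_left
      intro v _
      simp
      ring
    rw [hrow]
    have e3 : PySem.List.pyRange 0 (k + 1) 1 = (PySem.List.pyRange 0 (k - 1) 1 ++ [k - 1]) ++ [k] := by
      rw [← e1]
      exact PySem.List.pyRange_one_succ_right (by omega)
    rw [e3]
    simp [hQdef, List.append_assoc]

-- a range-mapped constant list is a replicate
theorem pv_map_const (n : Int) (x : List Int) :
    (PySem.List.pyRange 0 n 1).map (fun _ => x) = List.replicate n.toNat x := by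
  apply List.eq_replicate_iff.mpr
  constructor
  · simp [PySem.List.length_pyRange_one]
  · intro b hb
    simp at hb
    exact hb.2

-- the enumerate loop of A's n ≥ 4 branch writes the seed value into column 0 of row ind
theorem pv_enum_fill (r0 : List Int) :
    ∀ (zs : List Int) (s : Int), 0 ≤ s → ∀ (A : List (List Int)), A.length = s.toNat →
    (PySem.List.enumerate zs s).foldl
        (fun arr p => arr.set p.1.toNat ((arr.getD p.1.toNat []).set 0 p.2))
        (A ++ List.replicate zs.length r0)
      = A ++ zs.map (fun v => r0.set 0 v) := by
  intro zs
  induction zs with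
  | nil => intro s _ A _; simp [PySem.List.enumerate]
  | cons z zs ih =>
    intro s hs A hA
    rw [PySem.List.enumerate_cons, List.foldl_cons]
    have hA' : A.length = s.toNat := hA
    simp only [List.length_cons, List.replicate_succ]
    have hg : (A ++ r0 :: List.replicate zs.length r0).getD s.toNat [] = r0 := by
      rw [← hA']; exact pv_getD_append_cons A r0 _ []
    have hset : (A ++ r0 :: List.replicate zs.length r0).set s.toNat (r0.set 0 z)
        = A ++ (r0.set 0 z) :: List.replicate zs.length r0 := by
      rw [← hA']; exact pv_set_append_cons A r0 _ _
    rw [hg, hset]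
    have hre : A ++ (r0.set 0 z) :: List.replicate zs.length r0
        = (A ++ [r0.set 0 z]) ++ List.replicate zs.length r0 := by simp
    rw [hre, ih (s + 1) (by omega) (A ++ [r0.set 0 z]) (by simp [hA']; omega)]
    simp

-- row-wise fill: setting row i from row i itself, rows 0..t-1 (prefix of the mapped grid)
theorem pv_map_fill (g : List Int → List Int) :
    ∀ (t : Nat) (arr : List (List Int)), t ≤ arr.length →
    (List.range t).foldl (fun a i => a.set i (g (a.getD i []))) arr
      = (arr.map g).take t ++ arr.drop t := by
  intro t
  induction t with
  | zero => intro arr _; simp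
  | succ t ih =>
    intro arr ht
    have ht' : t ≤ arr.length := by omega
    have htl : t < arr.length := by omega
    rw [List.range_succ, List.foldl_append, ih arr ht']
    simp only [List.foldl_cons, List.foldl_nil]
    have hlen : ((arr.map g).take t).length = t := by
      simp [List.length_take]; omega
    have hg : (((arr.map g).take t) ++ arr.drop t).getD t [] = arr[t] := by
      rw [List.getD_append_right _ _ _ t (by omega), hlen, Nat.sub_self]
      rw [List.drop_eq_getElem_cons htl]
      simp [List.getElem?_eq_getElem htl]
    rw [hg, List.set_append, if_neg (by omega), hlen, Nat.sub_self]
    rw [List.drop_eq_getElem_cons htl, List.set_cons_zero]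
    have htake : (arr.map g).take (t + 1) = (arr.map g).take t ++ [g arr[t]] := by
      rw [List.take_add_one]
      have : (arr.map g)[t]? = some (g arr[t]) := by
        rw [List.getElem?_eq_getElem (by simpa using htl)]
        simp
      rw [this]
      rfl
    rw [htake]
    simp

-- one column pass of A's n ≥ 4 branch is a map over the rows
theorem pv_col_step (nn : Nat) (j c : Int) (arr : List (List Int)) (ha : arr.length = nn) :
    (PySem.List.pyRange 0 (nn : Int) 1).foldl (fun a i =>
        a.set i.toNat ((a.getD i.toNat []).set j.toNat
          (PySem.List.pyGetD (PySem.List.pyGetD a i []) (j - 1) 0 + c))) arr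
      = arr.map (fun r => r.set j.toNat (PySem.List.pyGetD r (j - 1) 0 + c)) := by
  rw [PySem.List.pyRange_zero_natCast, List.foldl_map]
  simp only [Int.toNat_natCast, PySem.List.pyGetD_natCast]
  refine ((pv_map_fill (fun r => r.set j.toNat (PySem.List.pyGetD r (j - 1) 0 + c)) nn arr
    (by omega)).trans ?_)
  rw [← ha]
  simp

-- A branch m ≥ 4 equals the closed form
theorem pv_branchA1 (n m : Int) (hm : 4 ≤ m) (hn : 1 ≤ n) :
    generate_forest_plan n m = pvClosed1 n m := by
  simp only [generate_forest_plan, if_pos hm]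
  simp only [PySem.List.pyRepeat_singleton]
  rw [PySem.List.pyRange_one_cons (by omega : (0:Int) < n)]
  simp only [List.map_cons, List.set_cons_zero]
  have h01 : (0:Int) + 1 = 1 := by norm_num
  rw [h01]
  rw [pv_outerA n m hm _ (pv_seed_length m (by omega)) n hn le_rfl]
  rw [PySem.List.pyRange_one_eq_nil le_rfl]
  simp [pvClosed1, pvSeed]

-- A branch n ≥ 4 (m ∈ {1,2,3}) equals the closed form
theorem pv_branchA2 (n m : Int) (hm3 : m ≤ 3) (hm1 : 1 ≤ m) (hn : 4 ≤ n) :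
    generate_forest_plan n m = pvClosed2 n m := by
  have hnn : ((n.toNat : Nat) : Int) = n := Int.toNat_of_nonneg (by omega)
  have hseed := pv_seed_length n (by omega : (0:Int) ≤ n)
  have henum : ∀ r0 : List Int,
      (PySem.List.enumerate (PySem.List.pyRange (n - 1) 0 (-2) ++ PySem.List.pyRange n 0 (-2)) 0).foldl
        (fun arr p => arr.set p.1.toNat ((arr.getD p.1.toNat []).set 0 p.2))
        (List.replicate n.toNat r0)
      = (PySem.List.pyRange (n - 1) 0 (-2) ++ PySem.List.pyRange n 0 (-2)).map (fun v => r0.set 0 v) := by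
    intro r0
    have h := pv_enum_fill r0 (PySem.List.pyRange (n - 1) 0 (-2) ++ PySem.List.pyRange n 0 (-2))
      0 le_rfl [] rfl
    rw [hseed] at h
    simpa using h
  have hmc : m = 1 ∨ m = 2 ∨ m = 3 := by omega
  rcases hmc with hm | hm | hm <;> subst hm <;>
    simp only [generate_forest_plan, pvClosed2, pvSeed, if_neg (by omega : ¬ (4:Int) ≤ 1),
      if_neg (by omega : ¬ (4:Int) ≤ 2), if_neg (by omega : ¬ (4:Int) ≤ 3), if_pos hn,
      PySem.List.pyRepeat_singleton, pv_map_const, henum]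
  · -- m = 1: no column loop
    rw [show PySem.List.pyRange 1 1 1 = [] by decide, List.foldl_nil]
    apply List.map_congr_left
    intro v _
    simp [show PySem.List.pyRange 0 1 1 = [0] by decide]
  · -- m = 2: one column pass (j = 1)
    rw [show PySem.List.pyRange 1 2 1 = [1] by decide]
    simp only [List.foldl_cons, List.foldl_nil]
    rw [← hnn]
    rw [pv_col_step n.toNat 1 ((n.toNat : Nat) : Int) ((PySem.List.pyRange (((n.toNat : Nat) : Int) - 1) 0 (-2) ++ PySem.List.pyRange ((n.toNat : Nat) : Int) 0 (-2)).map (fun v => (List.replicate (2 : Int).toNat 0).set 0 v)) (by rw [List.length_map, hnn]; exact hseed)]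
    rw [List.map_map]
    apply List.map_congr_left
    intro v _
    simp [show PySem.List.pyRange 0 2 1 = [0, 1] by decide, PySem.List.pyGetD]
  · -- m = 3: two column passes (j = 1, 2)
    rw [show PySem.List.pyRange 1 3 1 = [1, 2] by decide]
    simp only [List.foldl_cons, List.foldl_nil]
    rw [← hnn]
    rw [pv_col_step n.toNat 1 ((n.toNat : Nat) : Int) ((PySem.List.pyRange (((n.toNat : Nat) : Int) - 1) 0 (-2) ++ PySem.List.pyRange ((n.toNat : Nat) : Int) 0 (-2)).map (fun v => (List.replicate (3 : Int).toNat 0).set 0 v)) (by rw [List.length_map, hnn]; exact hseed)]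
    rw [List.map_map]
    rw [pv_col_step n.toNat 2 ((n.toNat : Nat) : Int) ((PySem.List.pyRange (((n.toNat : Nat) : Int) - 1) 0 (-2) ++ PySem.List.pyRange ((n.toNat : Nat) : Int) 0 (-2)).map ((fun r => r.set (1 : Int).toNat (PySem.List.pyGetD r (1 - 1) 0 + ((n.toNat : Nat) : Int))) ∘ (fun v => (List.replicate (3 : Int).toNat 0).set 0 v))) (by rw [List.length_map, hnn]; exact hseed)]
    rw [List.map_map]
    apply List.map_congr_left
    intro v _
    simp [show PySem.List.pyRange 0 3 1 = [0, 1, 2] by decide, PySem.List.pyGetD]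
    omega

-- ====== B side: scatter-by-value equals the closed seed map ======

-- pvSlot written with Lean's Euclidean / and % (divisor 2 > 0, so they agree with Python's)
theorem pv_slot_eq (k r : Int) :
    pvSlot k r = if (k - r) % 2 = 0 then k / 2 + (k - r) / 2 else (k - 1 - r) / 2 := by
  unfold pvSlot
  rw [PySem.Int.mod_eq_emod_of_pos (by norm_num), PySem.Int.floordiv_eq_ediv_of_pos (by norm_num : (0:Int) < 2),
    PySem.Int.floordiv_eq_ediv_of_pos (by norm_num : (0:Int) < 2),
    PySem.Int.floordiv_eq_ediv_of_pos (by norm_num : (0:Int) < 2)]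

-- range(a, 0, -2) in closed form
theorem pv_pyRange_neg2 (a : Int) :
    PySem.List.pyRange a 0 (-2) = List.map (fun t : Nat => a - 2 * (t : Int)) (List.range ((a + 1) / 2).toNat) := by
  have hf : (fun t : Nat => a + (-2) * (t : Int)) = fun t : Nat => a - 2 * (t : Int) := by
    funext t; ring
  by_cases ha : 0 < a
  · simp only [PySem.List.pyRange, if_neg (by norm_num : ¬ (-2 : Int) = 0),
      if_neg (by norm_num : ¬ (0:Int) < -2), if_pos ha]
    rw [show a - 0 + -(-2 : Int) - 1 = a + 1 by ring, show -(-2 : Int) = 2 by ring, hf]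
  · have h0 : ((a + 1) / 2).toNat = 0 := by omega
    simp only [PySem.List.pyRange, if_neg (by norm_num : ¬ (-2 : Int) = 0),
      if_neg (by norm_num : ¬ (0:Int) < -2), if_neg ha, h0]
    simp

-- the seed list read off at an index: pvVal
theorem pv_seed_getElem (k : Int) (hk : 1 ≤ k) (j : Nat) (hj : j < k.toNat) :
    (pvSeed k)[j]? = some (pvVal k j) := by
  unfold pvSeed pvVal
  rw [pv_pyRange_neg2 (k - 1), pv_pyRange_neg2 k]
  have hlen1 : (List.map (fun t : Nat => k - 1 - 2 * (t : Int)) (List.range ((k - 1 + 1) / 2).toNat)).length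
      = ((k - 1 + 1) / 2).toNat := by simp
  by_cases hc : (j : Int) < k / 2
  · have hj1 : j < ((k - 1 + 1) / 2).toNat := by omega
    rw [List.getElem?_append_left (by omega)]
    rw [List.getElem?_map, List.getElem?_range hj1]
    simp only [Option.map_some, Option.some.injEq]
    rw [if_pos hc]
  · have hj1 : ((k - 1 + 1) / 2).toNat ≤ j := by omega
    rw [List.getElem?_append_right (by omega)]
    rw [hlen1, List.getElem?_map, List.getElem?_range (by omega)]
    simp only [Option.map_some, Option.some.injEq]
    rw [if_neg hc]
    omega

-- pvSeed has k entries
theorem pv_seed_len (k : Int) (hk : 0 ≤ k) : (pvSeed k).length = k.toNat := by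
  unfold pvSeed
  exact pv_seed_length k hk

-- a foldl of sets preserves the length
theorem pv_scatter_length {α : Type} (g : Int → Nat) (f : Int → α) :
    ∀ (l : List Int) (init : List α),
    (l.foldl (fun a x => a.set (g x) (f x)) init).length = init.length := by
  intro l
  induction l with
  | nil => intro init; rfl
  | cons x l ih => intro init; simp only [List.foldl_cons]; rw [ih]; simp

-- indices no remaining write touches keep their value
theorem pv_scatter_miss {α : Type} (g : Int → Nat) (f : Int → α) (j : Nat) :
    ∀ (l : List Int) (init : List α), (∀ x ∈ l, g x ≠ j) →
    (l.foldl (fun a x => a.set (g x) (f x)) init)[j]? = init[j]? := by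
  intro l
  induction l with
  | nil => intro init _; rfl
  | cons x l ih =>
    intro init h
    simp only [List.foldl_cons]
    rw [ih _ (fun y hy => h y (List.mem_cons_of_mem x hy))]
    rw [List.getElem?_set_ne (h x (List.mem_cons_self))]

-- the last write to an index wins
theorem pv_scatter_hit {α : Type} (g : Int → Nat) (f : Int → α) (j : Nat)
    (l1 l2 : List Int) (r : Int) (init : List α) (hg : g r = j) (hj : j < init.length)
    (h2 : ∀ x ∈ l2, g x ≠ j) :
    ((l1 ++ r :: l2).foldl (fun a x => a.set (g x) (f x)) init)[j]? = some (f r) := by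
  rw [List.foldl_append, List.foldl_cons]
  rw [pv_scatter_miss g f j l2 _ h2]
  rw [hg]
  have hlen : (l1.foldl (fun a x => a.set (g x) (f x)) init).length = init.length :=
    pv_scatter_length g f l1 init
  rw [List.getElem?_set_self (by omega)]

-- scattering the values 1..k by pvSlot yields exactly the seed permutation, mapped by f
theorem pv_scatter {α : Type} (k : Int) (hk : 4 ≤ k) (f : Int → α) (init : List α)
    (hlen : init.length = k.toNat) :
    (PySem.List.pyRange 1 (k + 1) 1).foldl (fun a r => a.set (pvSlot k r).toNat (f r)) init
      = (pvSeed k).map f := by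
  apply List.ext_getElem?
  intro j
  by_cases hj : j < k.toNat
  · -- the unique value landing at j is pvVal k j
    have hjk : (j : Int) < k := by omega
    have hv1 : 1 ≤ pvVal k j := by unfold pvVal; split_ifs <;> omega
    have hv2 : pvVal k j ≤ k := by unfold pvVal; split_ifs <;> omega
    have hslotv : (pvSlot k (pvVal k j)).toNat = j := by
      rw [pv_slot_eq]
      unfold pvVal
      split_ifs <;> omega
    have hmiss : ∀ x ∈ PySem.List.pyRange (pvVal k j + 1) (k + 1) 1,
        (fun r => (pvSlot k r).toNat) x ≠ j := by
      intro x hx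
      rw [PySem.List.mem_pyRange_one] at hx
      show (pvSlot k x).toNat ≠ j
      rw [pv_slot_eq]
      unfold pvVal at hx
      split_ifs at hx ⊢ <;> omega
    have hsplit : PySem.List.pyRange 1 (k + 1) 1
        = PySem.List.pyRange 1 (pvVal k j) 1 ++ pvVal k j :: PySem.List.pyRange (pvVal k j + 1) (k + 1) 1 := by
      have ha1 := PySem.List.pyRange_one_append 1 (pvVal k j) (k + 1) hv1 (by omega : pvVal k j ≤ k + 1)
      have ha2 := PySem.List.pyRange_one_cons (show pvVal k j < k + 1 by omega)
      rw [ha1, ha2]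
    rw [hsplit, List.getElem?_map, pv_seed_getElem k (show (1:Int) ≤ k by omega) j hj]
    have hfin := pv_scatter_hit (fun r => (pvSlot k r).toNat) f j
      (PySem.List.pyRange 1 (pvVal k j) 1) (PySem.List.pyRange (pvVal k j + 1) (k + 1) 1)
      (pvVal k j) init hslotv (by omega) hmiss
    simpa using hfin
  · -- beyond the k entries: both sides are none
    rw [List.getElem?_eq_none, List.getElem?_eq_none]
    · rw [List.length_map, pv_seed_len k (by omega)]; omega
    · rw [pv_scatter_length]; omega

-- append-to-accumulator loop is a map
theorem pv_foldl_append_singleton {α β : Type} (g : α → β) :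
    ∀ (l : List α) (init : List β),
    l.foldl (fun acc x => acc ++ [g x]) init = init ++ l.map g := by
  intro l
  induction l with
  | nil => intro init; simp
  | cons x l ih => intro init; simp [ih]

-- B branch m ≥ 4 equals the closed form
theorem pv_branchB1 (n m : Int) (hm : 4 ≤ m) :
    generate_forest_plan_alt n m = pvClosed1 n m := by
  simp only [generate_forest_plan_alt, if_pos hm, PySem.List.pyRepeat_singleton]
  rw [pv_foldl_append_singleton
    (fun i => (PySem.List.pyRange 1 (m + 1) 1).foldl
      (fun row r => row.set (pvSlot m r).toNat (i * m + r)) (List.replicate m.toNat 0))]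
  rw [List.nil_append]
  unfold pvClosed1
  apply List.map_congr_left
  intro i _
  rw [pv_scatter m hm (fun r => i * m + r) _ (by simp)]
  apply List.map_congr_left
  intro v _
  ring

-- B branch n ≥ 4 (m ≤ 3) equals the closed form
theorem pv_branchB2 (n m : Int) (hn : 4 ≤ n) (hm : ¬ 4 ≤ m) :
    generate_forest_plan_alt n m = pvClosed2 n m := by
  simp only [generate_forest_plan_alt, if_neg hm, if_pos hn]
  exact pv_scatter n hn (fun r => (PySem.List.pyRange 0 m 1).map (fun j => r + j * n)) _ (by simp)

-- ===== VERDICT (by name: the statement is the Claim_ definition above) =====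
theorem generate_forest_plan_spec : Claim_equal_generate_forest_plan := by
  unfold Claim_equal_generate_forest_plan
  intro n m _ hpre
  unfold Spec_generate_forest_plan
  rcases hpre with ⟨h1, h2⟩ | ⟨h1, h2, h3⟩ | ⟨h1, h2⟩ | ⟨h1, h2⟩ | ⟨h1, h2⟩ | ⟨h1, h2⟩
  · rw [pv_branchA1 n m h1 h2, pv_branchB1 n m h1]
  · rw [pv_branchA2 n m h1 h2 h3, pv_branchB2 n m h3 (by omega)]
  · subst h1; subst h2; decide
  · subst h1; subst h2; decide
  · subst h1; subst h2; decide
  · subst h1; subst h2; decide
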